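-- pv_equiv track=rewrite | github.com/cristian2213/Statistical-Topics | src/stats/helpers.py | generate_bin_intervals
-- ===== SOURCE A (Python) =====
-- def generate_bin_intervals(min_value: int, bin_width: int, class_num: int):
--     """
--     Generate bin intervals for a data set.
--     Interval format: [(min_value, max_value), ...]
--     """
--     intervals = []
--     min_interval = min_value
--     for i in range(class_num):
--         upper_bound = min_interval + bin_width
--         intervals.append((min_interval, upper_bound))
--         min_interval = upper_bound + 1
--     return intervals
-- ===== SOURCE B (Python) =====
-- def generate_bin_intervals(min_value: int, bin_width: int, class_num: int):
--     """
--     Generate bin intervals for a data set.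
--     Interval format: [(min_value, max_value), ...]
--     """
--     return [
--         (min_value + i * (bin_width + 1), min_value + i * (bin_width + 1) + bin_width)
--         for i in range(class_num)
--     ]
-- ===== Notes on version B (the rewrite author's own statement) =====
-- stated objective: simpler
-- what changed: Replaced the stateful loop carrying a running min_interval accumulator with a stateless comprehension computing each interval in closed form from its index i.
import Mathlib
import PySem

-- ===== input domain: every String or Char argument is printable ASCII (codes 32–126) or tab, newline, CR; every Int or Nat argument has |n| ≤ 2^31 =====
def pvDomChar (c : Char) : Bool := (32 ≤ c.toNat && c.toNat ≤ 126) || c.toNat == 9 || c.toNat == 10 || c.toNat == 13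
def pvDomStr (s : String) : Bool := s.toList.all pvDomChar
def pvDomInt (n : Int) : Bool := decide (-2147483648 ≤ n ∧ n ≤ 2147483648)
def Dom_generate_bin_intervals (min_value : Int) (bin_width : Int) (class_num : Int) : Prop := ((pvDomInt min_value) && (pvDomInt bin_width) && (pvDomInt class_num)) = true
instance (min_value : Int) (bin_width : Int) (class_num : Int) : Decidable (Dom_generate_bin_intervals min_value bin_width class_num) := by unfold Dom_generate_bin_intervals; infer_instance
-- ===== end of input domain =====

-- B replaces A's running-accumulator loop by a stateless closed-form map over the indices (objective: simpler).

-- ===== PORT A =====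
-- loop with state (intervals, min_interval); each step appends (min_interval, min_interval+bin_width) and sets min_interval to upper_bound+1
def generate_bin_intervals (min_value : Int) (bin_width : Int) (class_num : Int) : List (Int × Int) :=
  ((PySem.List.pyRange 0 class_num 1).foldl
    (fun (s : List (Int × Int) × Int) _ =>
      let upper_bound := s.2 + bin_width
      (s.1 ++ [(s.2, upper_bound)], upper_bound + 1))
    ([], min_value)).1

-- ===== PORT B =====
def generate_bin_intervals_alt (min_value : Int) (bin_width : Int) (class_num : Int) : List (Int × Int) :=
  (PySem.List.pyRange 0 class_num 1).map
    (fun i => (min_value + i * (bin_width + 1), min_value + i * (bin_width + 1) + bin_width))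

-- ===== PRECONDITION & SPEC =====
def Spec_generate_bin_intervals (min_value : Int) (bin_width : Int) (class_num : Int) (out : List (Int × Int)) : Prop := out = generate_bin_intervals_alt min_value bin_width class_num
instance (min_value : Int) (bin_width : Int) (class_num : Int) (out : List (Int × Int)) : Decidable (Spec_generate_bin_intervals min_value bin_width class_num out) := by unfold Spec_generate_bin_intervals; infer_instance

-- ===== CLAIM (what is proved, stated in full; the proofs are below) =====
def Claim_equal_generate_bin_intervals : Prop := ∀ (min_value : Int) (bin_width : Int) (class_num : Int), Dom_generate_bin_intervals min_value bin_width class_num → Spec_generate_bin_intervals min_value bin_width class_num (generate_bin_intervals min_value bin_width class_num)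

-- ===== LEMMAS AND PROOFS =====

-- loop invariant: after n steps the accumulator holds the closed-form intervals and min_interval = mv + n*(w+1)
lemma gbi_loop_eq (mv w : Int) (n : Nat) :
    ((PySem.List.pyRange 0 n 1).foldl
      (fun (s : List (Int × Int) × Int) _ =>
        let upper_bound := s.2 + w
        (s.1 ++ [(s.2, upper_bound)], upper_bound + 1))
      ([], mv))
    = ((PySem.List.pyRange 0 n 1).map
        (fun i => (mv + i * (w + 1), mv + i * (w + 1) + w)),
       mv + n * (w + 1)) := by
  induction n with
  | zero => simp [PySem.List.pyRange_one_eq_nil]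
  | succ n ih =>
    have hsucc : ((n + 1 : Nat) : Int) = (n : Int) + 1 := by push_cast; ring
    rw [hsucc, PySem.List.pyRange_one_succ_right (by positivity)]
    rw [List.foldl_append, List.map_append, ih]
    simp
    ring

theorem generate_bin_intervals_spec : Claim_equal_generate_bin_intervals := by
  intro mv w cn _
  unfold Spec_generate_bin_intervals generate_bin_intervals generate_bin_intervals_alt
  by_cases h : cn ≤ 0
  · rw [PySem.List.pyRange_one_eq_nil (by omega)]
    simp
  · have hcn : cn = (cn.toNat : Int) := (Int.toNat_of_nonneg (by omega)).symm
    rw [hcn, congrArg Prod.fst (gbi_loop_eq mv w cn.toNat)]
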